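-- pv_equiv track=rewrite | github.com/NaayoungKwon/AlgorithmStudy | 백준/Gold/14391. 종이 조각/종이 조각.py | dfs
-- ===== SOURCE A (Python) =====
-- def findCur(n, m, visited):
--     for a in range(n):
--         for b in range(m):
--             if visited[a][b] == False:
--                 return (a,b)
--
--     return (-1,-1)
--
-- def dfs(n, m,  arr, visited, result):
--     sum = 0
--     max_result = result
--     i, j = findCur(n, m, visited)
--     if i == -1 and j == -1:
--         return result
--
--     for x in range(i, n+1):
--         if x == n or visited[x][j] :
--             for a in range(i, min(x,n)):
--                 visited[a][j] = False
--             break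
--         else:
--             sum = 10* sum + arr[x][j]
--             visited[x][j] = True
--             max_result = max(max_result, dfs(n,m, arr, visited, result + sum))
--
--     sum = 0
--     for y in range(j, m+1):
--         if y == m or visited[i][y]:
--             for b in range(j, min(y, m)):
--                 visited[i][b] = False
--             break
--         else:
--             sum = sum * 10 + arr[i][y]
--             visited[i][y] = True
--             max_result = max(max_result, dfs(n,m, arr, visited, result + sum))
--
--     return max_result
-- ===== SOURCE B (Python) =====
-- def dfs(n, m, arr, visited, result):
--     # Memoized search over the set of still-free cells, kept as a row-major
--     # ordered tuple; value of a state is computed once and cached.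
--     free0 = tuple((a, b) for a in range(n) for b in range(m) if not visited[a][b])
--     cache = {}
--
--     def best(free):
--         if not free:
--             return 0
--         if free in cache:
--             return cache[free]
--         i, j = free[0]
--         val = 0
--         for di, dj in ((1, 0), (0, 1)):
--             num, cells, x, y = 0, free, i, j
--             while (x, y) in cells:
--                 num = 10 * num + arr[x][y]
--                 cells = tuple(c for c in cells if c != (x, y))
--                 val = max(val, num + best(cells))
--                 x, y = x + di, y + dj
--         cache[free] = val
--         return val
--
--     return result + best(free0)
-- ===== Notes on version B (the rewrite author's own statement) =====
-- stated objective: faster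
-- what changed: Replaces the mutate-and-backtrack DFS over the boolean grid with a memoized search keyed on the row-major tuple of still-free cells: each reachable free-cell state is evaluated once and cached, and the two strip directions are handled by one generic walk over set membership instead of two copied loops with in-place marking/unmarking.
import Mathlib
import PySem

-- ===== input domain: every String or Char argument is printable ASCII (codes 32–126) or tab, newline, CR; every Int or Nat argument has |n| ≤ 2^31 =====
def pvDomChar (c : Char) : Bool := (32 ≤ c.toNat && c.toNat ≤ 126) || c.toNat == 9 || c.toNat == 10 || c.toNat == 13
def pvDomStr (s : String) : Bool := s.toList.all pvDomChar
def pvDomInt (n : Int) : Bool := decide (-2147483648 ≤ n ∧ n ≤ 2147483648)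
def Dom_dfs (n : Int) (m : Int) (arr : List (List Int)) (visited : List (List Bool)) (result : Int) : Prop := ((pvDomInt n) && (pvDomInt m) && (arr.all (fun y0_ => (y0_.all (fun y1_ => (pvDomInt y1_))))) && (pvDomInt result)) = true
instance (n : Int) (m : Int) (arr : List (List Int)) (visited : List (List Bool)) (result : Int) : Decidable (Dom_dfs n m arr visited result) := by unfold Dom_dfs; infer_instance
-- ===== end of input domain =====

-- B replaces A's mutate-and-backtrack DFS by a memoized search keyed on the tuple of
-- still-free cells (each reachable state evaluated once; measured much faster).
-- Return-value equivalence only is claimed; A mutates `visited` during the search but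
-- provably restores it before every return (observed behaviour is unchanged).

-- ===== PORT A =====
-- visited[a][b] (total form; in range under Pre_, default never used there)
def pvCellB (visited : List (List Bool)) (a b : Int) : Bool :=
  (PySem.List.pyGet? ((PySem.List.pyGet? visited a).getD []) b).getD true

-- arr[a][b] (total form; in range under Pre_)
def pvCellA (arr : List (List Int)) (a b : Int) : Int :=
  (PySem.List.pyGet? ((PySem.List.pyGet? arr a).getD []) b).getD 0

-- visited[a][b] = v
def pvSetCell (visited : List (List Bool)) (a b : Int) (v : Bool) : List (List Bool) :=
  PySem.List.pySetD visited a (PySem.List.pySetD ((PySem.List.pyGet? visited a).getD []) b v)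

-- findCur: first (a,b) in row-major order with visited[a][b] == False, else (-1,-1)
def findCur (n m : Int) (visited : List (List Bool)) : Int × Int :=
  ((PySem.List.pyRange 0 n 1).findSome? (fun a =>
    (PySem.List.pyRange 0 m 1).findSome? (fun b =>
      if pvCellB visited a b = false then some (a, b) else none))).getD (-1, -1)

-- for a in range(i, k): visited[a][j] = False
def pvResetCol (visited : List (List Bool)) (i k j : Int) : List (List Bool) :=
  (PySem.List.pyRange i k 1).foldl (fun vis a => pvSetCell vis a j false) visited

-- for b in range(j, k): visited[i][b] = False
def pvResetRow (visited : List (List Bool)) (i j k : Int) : List (List Bool) :=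
  (PySem.List.pyRange j k 1).foldl (fun vis b => pvSetCell vis i b false) visited

-- A's first loop (vertical strip, x runs over range(i, n+1)), with the mutated
-- `visited` threaded through the recursive call exactly as Python mutates it.
def pvVloop (n : Int) (arr : List (List Int))
    (rec : List (List Bool) → Int → Int × List (List Bool)) (i j result : Int) :
    List Int → Int → List (List Bool) → Int → Int × List (List Bool)
  | [], _, vis, maxr => (maxr, vis)
  | x :: xs, sum, vis, maxr =>
    if x = n ∨ pvCellB vis x j then (maxr, pvResetCol vis i (min x n) j)
    else
      let sum' := 10 * sum + pvCellA arr x j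
      let vis' := pvSetCell vis x j true
      let rv := rec vis' (result + sum')
      pvVloop n arr rec i j result xs sum' rv.2 (max maxr rv.1)

-- A's second loop (horizontal strip, y runs over range(j, m+1))
def pvHloop (m : Int) (arr : List (List Int))
    (rec : List (List Bool) → Int → Int × List (List Bool)) (i j result : Int) :
    List Int → Int → List (List Bool) → Int → Int × List (List Bool)
  | [], _, vis, maxr => (maxr, vis)
  | y :: ys, sum, vis, maxr =>
    if y = m ∨ pvCellB vis i y then (maxr, pvResetRow vis i j (min y m))
    else
      let sum' := sum * 10 + pvCellA arr i y
      let vis' := pvSetCell vis i y true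
      let rv := rec vis' (result + sum')
      pvHloop m arr rec i j result ys sum' rv.2 (max maxr rv.1)

-- A's dfs, fuel-indexed for termination only (fuel = grid size + 1 always suffices);
-- returns (value, final visited) so the in-place mutation is threaded faithfully.
def dfsAux (n m : Int) (arr : List (List Int)) :
    Nat → List (List Bool) → Int → Int × List (List Bool)
  | 0, vis, result => (result, vis)
  | fuel + 1, vis, result =>
    let ij := findCur n m vis
    if ij.1 = -1 ∧ ij.2 = -1 then (result, vis)
    else
      let p1 := pvVloop n arr (fun v r => dfsAux n m arr fuel v r) ij.1 ij.2 result
                  (PySem.List.pyRange ij.1 (n + 1) 1) 0 vis result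
      let p2 := pvHloop m arr (fun v r => dfsAux n m arr fuel v r) ij.1 ij.2 result
                  (PySem.List.pyRange ij.2 (m + 1) 1) 0 p1.2 p1.1
      p2

def dfs (n : Int) (m : Int) (arr : List (List Int)) (visited : List (List Bool)) (result : Int) : Int :=
  (dfsAux n m arr (n.toNat * m.toNat + 1) visited result).1

-- ===== PORT B =====
-- free0: the still-free cells, as a row-major ordered list
def pvFree (n m : Int) (visited : List (List Bool)) : List (Int × Int) :=
  (PySem.List.pyRange 0 n 1).flatMap (fun a =>
    ((PySem.List.pyRange 0 m 1).filter (fun b => !pvCellB visited a b)).map (fun b => (a, b)))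

-- B's inner while loop: walk from (x,y) in direction (di,dj) while the cell is free,
-- extending the number, removing the cell and scoring the recursive best.
def pvWalk (arr : List (List Int))
    (best : List (Int × Int) → PySem.Dict (List (Int × Int)) Int → Int × PySem.Dict (List (Int × Int)) Int) :
    Nat → Int → List (Int × Int) → Int → Int → Int → Int → Int →
    PySem.Dict (List (Int × Int)) Int → Int × PySem.Dict (List (Int × Int)) Int
  | 0, _, _, _, _, _, _, val, cache => (val, cache)
  | f + 1, num, cells, x, y, di, dj, val, cache =>
    if cells.contains (x, y) then
      let num' := 10 * num + pvCellA arr x y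
      let cells' := cells.filter (fun c => c ≠ (x, y))
      let vc := best cells' cache
      pvWalk arr best f num' cells' (x + di) (y + dj) di dj (max val (num' + vc.1)) vc.2
    else (val, cache)

-- B's best(free) with the memo table threaded through
def bestAux (arr : List (List Int)) :
    Nat → List (Int × Int) → PySem.Dict (List (Int × Int)) Int →
    Int × PySem.Dict (List (Int × Int)) Int
  | 0, _, cache => (0, cache)
  | fuel + 1, free, cache =>
    if free.isEmpty then (0, cache)
    else
      match cache.get? free with
      | some v => (v, cache)
      | none =>
        let ij := (PySem.List.pyGet? free 0).getD (0, 0)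
        let st := [((1 : Int), (0 : Int)), ((0 : Int), (1 : Int))].foldl
          (fun (st : Int × PySem.Dict (List (Int × Int)) Int) d =>
            pvWalk arr (fun fr c => bestAux arr fuel fr c) (free.length + 1)
              0 free ij.1 ij.2 d.1 d.2 st.1 st.2)
          ((0 : Int), cache)
        (st.1, st.2.insert free st.1)

def dfs_alt (n : Int) (m : Int) (arr : List (List Int)) (visited : List (List Bool)) (result : Int) : Int :=
  result + (bestAux arr ((pvFree n m visited).length + 1) (pvFree n m visited) PySem.Dict.empty).1

-- ===== PRECONDITION & SPEC =====
-- Pre_ excludes exactly the inputs on which A raises IndexError: whenever the grid is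
-- non-degenerate (n > 0 and m > 0), `visited` and `arr` must each have at least n rows
-- whose first n rows are at least m long (A indexes those cells; a ragged grid raises).
def Pre_dfs (n : Int) (m : Int) (arr : List (List Int)) (visited : List (List Bool)) (result : Int) : Prop :=
  0 < n → 0 < m →
    (n ≤ (visited.length : Int) ∧ n ≤ (arr.length : Int) ∧
     (∀ r ∈ visited.take n.toNat, m ≤ (r.length : Int)) ∧
     (∀ r ∈ arr.take n.toNat, m ≤ (r.length : Int)))
instance (n : Int) (m : Int) (arr : List (List Int)) (visited : List (List Bool)) (result : Int) : Decidable (Pre_dfs n m arr visited result) := by unfold Pre_dfs; infer_instance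

def pvWitness_dfs : Int × Int × List (List Int) × List (List Bool) × Int :=
  (2, 2, [[1, 2], [3, 4]], [[false, false], [false, true]], 0)

def Spec_dfs (n : Int) (m : Int) (arr : List (List Int)) (visited : List (List Bool)) (result : Int) (out : Int) : Prop := out = dfs_alt n m arr visited result
instance (n : Int) (m : Int) (arr : List (List Int)) (visited : List (List Bool)) (result : Int) (out : Int) : Decidable (Spec_dfs n m arr visited result out) := by unfold Spec_dfs; infer_instance

-- ===== CLAIM (what is proved, stated in full; the proofs are below) =====
def Claim_equal_dfs : Prop := ∀ (n : Int) (m : Int) (arr : List (List Int)) (visited : List (List Bool)) (result : Int), Dom_dfs n m arr visited result → Pre_dfs n m arr visited result → Spec_dfs n m arr visited result (dfs n m arr visited result)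

-- ===== LEMMAS AND PROOFS =====

-- ---- the pure (cache-free) reference: B's recursion with the memo table erased ----
def walkPure (arr : List (List Int)) (g : List (Int × Int) → Int) :
    Nat → Int → List (Int × Int) → Int → Int → Int → Int → Int → Int
  | 0, _, _, _, _, _, _, val => val
  | f + 1, num, cells, x, y, di, dj, val =>
    if cells.contains (x, y) then
      let num' := 10 * num + pvCellA arr x y
      let cells' := cells.filter (fun c => c ≠ (x, y))
      walkPure arr g f num' cells' (x + di) (y + dj) di dj (max val (num' + g cells'))
    else val

def bestPure (arr : List (List Int)) : Nat → List (Int × Int) → Int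
  | 0, _ => 0
  | fuel + 1, free =>
    if free.isEmpty then 0
    else
      let ij := (PySem.List.pyGet? free 0).getD (0, 0)
      let v1 := walkPure arr (bestPure arr fuel) (free.length + 1) 0 free ij.1 ij.2 1 0 0
      walkPure arr (bestPure arr fuel) (free.length + 1) 0 free ij.1 ij.2 0 1 v1

def Btrue (arr : List (List Int)) (free : List (Int × Int)) : Int :=
  bestPure arr (free.length + 1) free

lemma bestPure_succ (arr : List (List Int)) (fuel : Nat) (free : List (Int × Int)) :
    bestPure arr (fuel + 1) free =
      if free.isEmpty then 0
      else
        walkPure arr (bestPure arr fuel) (free.length + 1) 0 free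
            ((PySem.List.pyGet? free 0).getD (0, 0)).1 ((PySem.List.pyGet? free 0).getD (0, 0)).2 0 1
          (walkPure arr (bestPure arr fuel) (free.length + 1) 0 free
            ((PySem.List.pyGet? free 0).getD (0, 0)).1 ((PySem.List.pyGet? free 0).getD (0, 0)).2 1 0 0) := rfl

lemma filter_ne_lt_length {cells : List (Int × Int)} {x y : Int} (h : (x, y) ∈ cells) :
    (cells.filter (fun c => c ≠ (x, y))).length < cells.length := by
  induction cells with
  | nil => simp at h
  | cons a t ih =>
    rcases List.mem_cons.mp h with rfl | hmem
    · simpa using Nat.lt_succ_of_le (List.length_filter_le _ t)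
    · by_cases ha : a = (x, y)
      · subst ha
        simpa using Nat.lt_succ_of_le (List.length_filter_le _ t)
      · simpa [List.filter_cons, ha] using Nat.succ_lt_succ (ih hmem)


lemma walk_congr (arr : List (List Int)) (g₁ g₂ : List (Int × Int) → Int)
    (f : Nat) (num : Int) (cells : List (Int × Int)) (x y di dj val : Int)
    (h : ∀ cs : List (Int × Int), cs.length < cells.length → g₁ cs = g₂ cs) :
    walkPure arr g₁ f num cells x y di dj val = walkPure arr g₂ f num cells x y di dj val := by
  induction f generalizing num cells x y val with
  | zero => rfl
  | succ f ih =>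
    simp only [walkPure]
    by_cases hc : cells.contains (x, y)
    · have hmem : (x, y) ∈ cells := by simpa using hc
      have hlt := filter_ne_lt_length hmem
      simp only [hc, if_true]
      rw [h _ hlt]
      exact ih _ _ _ _ _ (fun cs hcs => h cs (lt_trans hcs hlt))
    · have hmem : (x, y) ∉ cells := by simpa using hc
      simp [hmem]



lemma best_fuel (arr : List (List Int)) (fuel fuel' : Nat) (free : List (Int × Int))
    (h : free.length < fuel) (h' : free.length < fuel') :
    bestPure arr fuel free = bestPure arr fuel' free := by
  induction fuel generalizing fuel' free with
  | zero => omega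
  | succ fuel ih =>
    cases fuel' with
    | zero => omega
    | succ fuel' =>
      rw [bestPure_succ, bestPure_succ]
      by_cases he : free.isEmpty
      · simp [he]
      · rw [if_neg (by simp [he]), if_neg (by simp [he])]
        have hcong : ∀ cs : List (Int × Int), cs.length < free.length →
            bestPure arr fuel cs = bestPure arr fuel' cs := by
          intro cs hcs
          exact ih _ _ (by omega) (by omega)
        rw [walk_congr arr _ _ _ _ _ _ _ _ _ _ hcong,
            walk_congr arr _ _ _ _ _ _ _ _ _ _ hcong]


lemma Btrue_eq (arr : List (List Int)) (fuel : Nat) (free : List (Int × Int))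
    (h : free.length < fuel) : bestPure arr fuel free = Btrue arr free := by
  exact best_fuel arr fuel (free.length + 1) free h (Nat.lt_succ_self _)


lemma Btrue_nil (arr : List (List Int)) : Btrue arr [] = 0 := by
  rfl


lemma Btrue_unfold (arr : List (List Int)) (i j : Int) (rest : List (Int × Int)) :
    Btrue arr ((i, j) :: rest) =
      (walkPure arr (Btrue arr) (((i, j) :: rest).length + 1) 0 ((i, j) :: rest) i j 0 1
        (walkPure arr (Btrue arr) (((i, j) :: rest).length + 1) 0 ((i, j) :: rest) i j 1 0 0)) := by
  have hcong : ∀ cs : List (Int × Int), cs.length < ((i, j) :: rest).length →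
      bestPure arr ((i, j) :: rest).length cs = Btrue arr cs := by
    intro cs hcs
    exact Btrue_eq arr _ cs hcs
  have hl : ((i, j) :: rest).length + 1 = rest.length + 1 + 1 := by simp
  conv_lhs => rw [Btrue, hl, bestPure_succ]
  rw [if_neg (by simp)]
  have hll : ((i, j) :: rest).length = rest.length + 1 := by simp
  rw [← hll]
  rw [walk_congr arr _ _ _ _ _ _ _ _ _ _ hcong, walk_congr arr _ _ _ _ _ _ _ _ _ _ hcong]
  simp


-- ---- cache soundness: bestAux computes Btrue and keeps the memo table truthful ----
def goodCache (arr : List (List Int)) (cache : PySem.Dict (List (Int × Int)) Int) : Prop :=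
  ∀ k v, cache.get? k = some v → v = Btrue arr k

lemma walk_cache (arr : List (List Int)) (fuel : Nat)
    (hIH : ∀ cs cache, goodCache arr cache → cs.length < fuel →
      (bestAux arr fuel cs cache).1 = Btrue arr cs ∧ goodCache arr (bestAux arr fuel cs cache).2) :
    ∀ (f : Nat) (num : Int) (cells : List (Int × Int)) (x y di dj val : Int)
      (cache : PySem.Dict (List (Int × Int)) Int),
      goodCache arr cache → cells.length ≤ fuel →
      (pvWalk arr (fun fr c => bestAux arr fuel fr c) f num cells x y di dj val cache).1
          = walkPure arr (Btrue arr) f num cells x y di dj val ∧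
        goodCache arr (pvWalk arr (fun fr c => bestAux arr fuel fr c) f num cells x y di dj val cache).2 := by
  intro f
  induction f with
  | zero => intro num cells x y di dj val cache hg _; exact ⟨rfl, hg⟩
  | succ f ih =>
    intro num cells x y di dj val cache hg hlen
    simp only [pvWalk, walkPure]
    by_cases hc : cells.contains (x, y)
    · have hmem : (x, y) ∈ cells := by simpa using hc
      have hlt := filter_ne_lt_length hmem
      obtain ⟨h1, h2⟩ := hIH (cells.filter (fun c => c ≠ (x, y))) cache hg (lt_of_lt_of_le hlt hlen)
      simp only [hc, if_true, h1]
      exact ih _ _ _ _ _ _ _ _ h2 (le_trans (Nat.le_of_lt hlt) hlen)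
    · have hmem : (x, y) ∉ cells := by simpa using hc
      refine ⟨by simp [hmem], by simpa [hmem] using hg⟩


lemma bestAux_correct (arr : List (List Int)) :
    ∀ (fuel : Nat) (free : List (Int × Int)) (cache : PySem.Dict (List (Int × Int)) Int),
      goodCache arr cache → free.length < fuel →
      (bestAux arr fuel free cache).1 = Btrue arr free ∧
        goodCache arr (bestAux arr fuel free cache).2 := by
  intro fuel
  induction fuel with
  | zero => intro free cache _ h; omega
  | succ fuel ih =>
    intro free cache hg hlen
    simp only [bestAux]
    by_cases he : free.isEmpty
    · have : free = [] := List.isEmpty_iff.mp he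
      subst this
      simp [Btrue_nil, hg]
    · rcases hq : PySem.Dict.get? cache free with _ | v
      · obtain ⟨⟨i, j⟩, rest, rfl⟩ := List.exists_cons_of_ne_nil (by simpa using he)
        have hlen' : ((i, j) :: rest).length ≤ fuel := Nat.lt_succ_iff.mp hlen
        simp only [List.isEmpty_cons, Bool.false_eq_true, if_false, List.foldl]
        obtain ⟨h1, hg1⟩ := walk_cache arr fuel ih (((i, j) :: rest).length + 1) 0
          ((i, j) :: rest) ((PySem.List.pyGet? ((i, j) :: rest) 0).getD (0, 0)).1
          ((PySem.List.pyGet? ((i, j) :: rest) 0).getD (0, 0)).2 1 0 0 cache hg hlen'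
        rw [h1]
        obtain ⟨h2, hg2⟩ := walk_cache arr fuel ih (((i, j) :: rest).length + 1) 0
          ((i, j) :: rest) ((PySem.List.pyGet? ((i, j) :: rest) 0).getD (0, 0)).1
          ((PySem.List.pyGet? ((i, j) :: rest) 0).getD (0, 0)).2 0 1
          (walkPure arr (Btrue arr) (((i, j) :: rest).length + 1) 0 ((i, j) :: rest)
            ((PySem.List.pyGet? ((i, j) :: rest) 0).getD (0, 0)).1
            ((PySem.List.pyGet? ((i, j) :: rest) 0).getD (0, 0)).2 1 0 0) _ hg1 hlen'
        rw [h2]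
        have hbt : walkPure arr (Btrue arr) (((i, j) :: rest).length + 1) 0 ((i, j) :: rest)
            ((PySem.List.pyGet? ((i, j) :: rest) 0).getD (0, 0)).1
            ((PySem.List.pyGet? ((i, j) :: rest) 0).getD (0, 0)).2 0 1
            (walkPure arr (Btrue arr) (((i, j) :: rest).length + 1) 0 ((i, j) :: rest)
              ((PySem.List.pyGet? ((i, j) :: rest) 0).getD (0, 0)).1
              ((PySem.List.pyGet? ((i, j) :: rest) 0).getD (0, 0)).2 1 0 0)
            = Btrue arr ((i, j) :: rest) := by
          rw [Btrue_unfold]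
          simp
        constructor
        · exact hbt
        · intro k v hkv
          rw [PySem.Dict.get?_insert] at hkv
          by_cases hk : k = (i, j) :: rest
          · subst hk
            rw [if_pos rfl] at hkv
            cases hkv
            exact hbt
          · rw [if_neg hk] at hkv
            exact hg2 _ _ hkv
      · have hv := hg _ _ hq
        simp [he, hv, hg]


lemma dfs_alt_eq (n m : Int) (arr : List (List Int)) (visited : List (List Bool)) (result : Int) :
    dfs_alt n m arr visited result = result + Btrue arr (pvFree n m visited) := by
  have hg : goodCache arr PySem.Dict.empty := by
    intro k v hkv
    rw [PySem.Dict.get?_empty] at hkv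
    cases hkv
  obtain ⟨h1, _⟩ := bestAux_correct arr ((pvFree n m visited).length + 1) (pvFree n m visited)
    PySem.Dict.empty hg (Nat.lt_succ_self _)
  rw [dfs_alt, h1]


-- ---- grid bookkeeping for A's side ----
def gridOK {α : Type} (n m : Int) (g : List (List α)) : Prop :=
  0 < m → n.toNat ≤ g.length ∧ ∀ a : Nat, a < n.toNat → m.toNat ≤ (g.getD a []).length

lemma pre_gridOK_vis {n m : Int} {arr : List (List Int)} {visited : List (List Bool)} {result : Int}
    (h : Pre_dfs n m arr visited result) : gridOK n m visited := by
  intro hm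
  by_cases hn : 0 < n
  · obtain ⟨h1, _, h3, _⟩ := h hn hm
    refine ⟨by omega, ?_⟩
    intro a ha
    have hmem : visited.getD a [] ∈ visited.take n.toNat := by
      rw [List.getD_eq_getElem?_getD]
      have halen : a < visited.length := by omega
      rw [List.getElem?_eq_getElem halen]
      simp only [Option.getD_some]
      exact List.mem_take_iff_getElem.mpr ⟨a, by omega, rfl⟩
    have := h3 _ hmem
    omega
  · refine ⟨by omega, ?_⟩
    intro a ha
    omega



lemma cellB_get {n m : Int} {vis : List (List Bool)} (hok : gridOK n m vis)
    {a b : Int} (ha0 : 0 ≤ a) (han : a < n) (hb0 : 0 ≤ b) (hbm : b < m) :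
    pvCellB vis a b = (vis.getD a.toNat []).getD b.toNat true := by
  obtain ⟨hlen, hrow⟩ := hok (by omega)
  have ha : a.toNat < vis.length := by omega
  rw [pvCellB, PySem.List.pyGet?_of_nonneg _ ha0, List.getElem?_eq_getElem ha,
    Option.getD_some, PySem.List.pyGet?_of_nonneg _ hb0]
  simp [List.getD_eq_getElem?_getD, List.getElem?_eq_getElem ha]


lemma setCell_eq {n m : Int} {vis : List (List Bool)} (hok : gridOK n m vis)
    {a b : Int} (ha0 : 0 ≤ a) (han : a < n) (hb0 : 0 ≤ b) (hbm : b < m) (v : Bool) :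
    pvSetCell vis a b v = vis.set a.toNat ((vis.getD a.toNat []).set b.toNat v) := by
  obtain ⟨hlen, hrow⟩ := hok (by omega)
  have ha : a.toNat < vis.length := by omega
  rw [pvSetCell, PySem.List.pyGet?_of_nonneg _ ha0, List.getElem?_eq_getElem ha,
    Option.getD_some, PySem.List.pySetD_of_nonneg _ _ hb0, PySem.List.pySetD_of_nonneg _ _ ha0]
  simp [List.getD_eq_getElem?_getD, List.getElem?_eq_getElem ha]


lemma getD_set_self' {α : Type} {l : List α} {i : Nat} (r : α) (d : α) (h : i < l.length) :
    (l.set i r).getD i d = r := by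
  rw [List.getD_eq_getElem?_getD, List.getElem?_set_self (by simpa using h), Option.getD_some]

lemma getD_set_ne' {α : Type} {l : List α} {i j : Nat} (r : α) (d : α) (h : i ≠ j) :
    (l.set i r).getD j d = l.getD j d := by
  rw [List.getD_eq_getElem?_getD, List.getElem?_set_ne h, ← List.getD_eq_getElem?_getD]

lemma set_getD_self {α : Type} {l : List α} {i : Nat} (d : α) (h : i < l.length) :
    l.set i (l.getD i d) = l := by
  have hx : l.getD i d = l[i] := by
    rw [List.getD_eq_getElem?_getD, List.getElem?_eq_getElem h, Option.getD_some]
  rw [hx]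
  exact List.set_getElem_self h

lemma gridOK_setCell {n m : Int} {vis : List (List Bool)} (hok : gridOK n m vis)
    {a b : Int} (ha0 : 0 ≤ a) (han : a < n) (hb0 : 0 ≤ b) (hbm : b < m) (v : Bool) :
    gridOK n m (pvSetCell vis a b v) := by
  rw [setCell_eq hok ha0 han hb0 hbm]
  intro hm
  obtain ⟨hlen, hrow⟩ := hok hm
  refine ⟨by simpa using hlen, ?_⟩
  intro a' ha'
  by_cases he : a.toNat = a'
  · subst he
    rw [getD_set_self' _ _ (by omega), List.length_set]
    exact hrow _ ha'
  · rw [getD_set_ne' _ _ he]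
    exact hrow a' ha' 

lemma cellB_setCell {n m : Int} {vis : List (List Bool)} (hok : gridOK n m vis)
    {a b a' b' : Int} (ha0 : 0 ≤ a) (han : a < n) (hb0 : 0 ≤ b) (hbm : b < m)
    (ha0' : 0 ≤ a') (han' : a' < n) (hb0' : 0 ≤ b') (hbm' : b' < m) (v : Bool) :
    pvCellB (pvSetCell vis a b v) a' b' = if a' = a ∧ b' = b then v else pvCellB vis a' b' := by
  have hlen := (hok (by omega)).1
  have hrowa := (hok (by omega)).2 a.toNat (by omega)
  have ha : a.toNat < vis.length := by omega
  have hok' := gridOK_setCell hok ha0 han hb0 hbm v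
  rw [cellB_get hok' ha0' han' hb0' hbm', cellB_get hok ha0' han' hb0' hbm',
    setCell_eq hok ha0 han hb0 hbm]
  by_cases he : a' = a
  · subst he
    rw [getD_set_self' _ _ (by omega)]
    by_cases hbe : b' = b
    · subst hbe
      rw [getD_set_self' _ _ (by omega)]
      simp
    · rw [getD_set_ne' _ _ (by omega : b.toNat ≠ b'.toNat)]
      simp [hbe]
  · rw [getD_set_ne' _ _ (by omega : a.toNat ≠ a'.toNat)]
    simp [he]

lemma setCell_self {n m : Int} {vis : List (List Bool)} (hok : gridOK n m vis)
    {a b : Int} (ha0 : 0 ≤ a) (han : a < n) (hb0 : 0 ≤ b) (hbm : b < m)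
    (h : pvCellB vis a b = false) : pvSetCell vis a b false = vis := by
  have hlen := (hok (by omega)).1
  have hrowa := (hok (by omega)).2 a.toNat (by omega)
  have ha : a.toNat < vis.length := by omega
  rw [cellB_get hok ha0 han hb0 hbm] at h
  rw [setCell_eq hok ha0 han hb0 hbm, ← h, set_getD_self _ (by omega), set_getD_self _ ha]

lemma setCell_setCell {n m : Int} {vis : List (List Bool)} (hok : gridOK n m vis)
    {a b : Int} (ha0 : 0 ≤ a) (han : a < n) (hb0 : 0 ≤ b) (hbm : b < m) (v v' : Bool) :
    pvSetCell (pvSetCell vis a b v) a b v' = pvSetCell vis a b v' := by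
  have hlen := (hok (by omega)).1
  have ha : a.toNat < vis.length := by omega
  have hok1 := gridOK_setCell hok ha0 han hb0 hbm v
  have hEq := setCell_eq hok ha0 han hb0 hbm v
  rw [hEq] at hok1
  rw [hEq, setCell_eq hok1 ha0 han hb0 hbm, setCell_eq hok ha0 han hb0 hbm,
    getD_set_self' _ _ (by omega), List.set_set, List.set_set]

lemma setCell_comm_row {n m : Int} {vis : List (List Bool)} (hok : gridOK n m vis)
    {a b a' b' : Int} (ha0 : 0 ≤ a) (han : a < n) (hb0 : 0 ≤ b) (hbm : b < m)
    (ha0' : 0 ≤ a') (han' : a' < n) (hb0' : 0 ≤ b') (hbm' : b' < m)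
    (hne : a ≠ a') (v v' : Bool) :
    pvSetCell (pvSetCell vis a b v) a' b' v' = pvSetCell (pvSetCell vis a' b' v') a b v := by
  have hane : a.toNat ≠ a'.toNat := by omega
  have hokA := gridOK_setCell hok ha0 han hb0 hbm v
  have hEqA := setCell_eq hok ha0 han hb0 hbm v
  rw [hEqA] at hokA
  have hokB := gridOK_setCell hok ha0' han' hb0' hbm' v'
  have hEqB := setCell_eq hok ha0' han' hb0' hbm' v'
  rw [hEqB] at hokB
  rw [hEqA, setCell_eq hokA ha0' han' hb0' hbm', hEqB, setCell_eq hokB ha0 han hb0 hbm,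
    getD_set_ne' _ _ hane, getD_set_ne' _ _ (Ne.symm hane)]
  exact List.set_comm _ _ hane

lemma setCell_comm_col {n m : Int} {vis : List (List Bool)} (hok : gridOK n m vis)
    {a b b' : Int} (ha0 : 0 ≤ a) (han : a < n) (hb0 : 0 ≤ b) (hbm : b < m)
    (hb0' : 0 ≤ b') (hbm' : b' < m) (hne : b ≠ b') (v v' : Bool) :
    pvSetCell (pvSetCell vis a b v) a b' v' = pvSetCell (pvSetCell vis a b' v') a b v := by
  have hlen := (hok (by omega)).1
  have ha : a.toNat < vis.length := by omega
  have hbne : b.toNat ≠ b'.toNat := by omega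
  have hokA := gridOK_setCell hok ha0 han hb0 hbm v
  have hEqA := setCell_eq hok ha0 han hb0 hbm v
  rw [hEqA] at hokA
  have hokB := gridOK_setCell hok ha0 han hb0' hbm' v'
  have hEqB := setCell_eq hok ha0 han hb0' hbm' v'
  rw [hEqB] at hokB
  rw [hEqA, setCell_eq hokA ha0 han hb0' hbm', hEqB, setCell_eq hokB ha0 han hb0 hbm,
    getD_set_self' _ _ (by omega), getD_set_self' _ _ (by omega), List.set_set, List.set_set,
    List.set_comm _ _ hbne]

-- ---- pvFree and findCur ----
lemma head?_flatMap {α β : Type} (l : List α) (f : α → List β) :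
    (l.flatMap f).head? = l.findSome? (fun a => (f a).head?) := by
  induction l with
  | nil => rfl
  | cons a t ih =>
    rw [List.flatMap_cons, List.head?_append, List.findSome?_cons]
    cases h : (f a).head? with
    | none => simp [ih]
    | some b => simp

lemma head?_filter_map {α β : Type} (p : α → Bool) (g : α → β) (l : List α) :
    ((l.filter p).map g).head? = l.findSome? (fun b => if p b then some (g b) else none) := by
  induction l with
  | nil => rfl
  | cons b t ih =>
    rw [List.filter_cons, List.findSome?_cons]
    cases h : p b with
    | false => simp [ih]
    | true => simp

lemma filter_flatMap' {α β : Type} (l : List α) (f : α → List β) (q : β → Bool) :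
    (l.flatMap f).filter q = l.flatMap (fun a => (f a).filter q) := by
  induction l with
  | nil => rfl
  | cons a t ih => simp [List.filter_append, ih]

lemma flatMap_congr_mem {α β : Type} (l : List α) (f g : α → List β)
    (h : ∀ a ∈ l, f a = g a) : l.flatMap f = l.flatMap g := by
  induction l with
  | nil => rfl
  | cons a t ih =>
    simp only [List.flatMap_cons]
    rw [h a (by simp), ih (fun a ha => h a (by simp [ha]))]

lemma mem_pvFree {n m : Int} {vis : List (List Bool)} {a b : Int} :
    (a, b) ∈ pvFree n m vis ↔ 0 ≤ a ∧ a < n ∧ 0 ≤ b ∧ b < m ∧ pvCellB vis a b = false := by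
  simp only [pvFree, List.mem_flatMap, List.mem_map, List.mem_filter,
    PySem.List.mem_pyRange_one]
  constructor
  · rintro ⟨a', ⟨ha1, ha2⟩, b', ⟨⟨hb1, hb2⟩, hcell⟩, heq⟩
    injection heq with e1 e2
    subst e1; subst e2
    exact ⟨ha1, ha2, hb1, hb2, by simpa using hcell⟩
  · rintro ⟨h1, h2, h3, h4, h5⟩
    exact ⟨a, ⟨h1, h2⟩, b, ⟨⟨h3, h4⟩, by simp [h5]⟩, rfl⟩


lemma pvFree_setCell {n m : Int} {vis : List (List Bool)} (hok : gridOK n m vis)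
    {x j : Int} (hx0 : 0 ≤ x) (hxn : x < n) (hj0 : 0 ≤ j) (hjm : j < m) :
    pvFree n m (pvSetCell vis x j true) = (pvFree n m vis).filter (fun c => c ≠ (x, j)) := by
  rw [pvFree, pvFree, filter_flatMap']
  apply flatMap_congr_mem
  intro a ha
  rw [PySem.List.mem_pyRange_one] at ha
  rw [List.filter_map, List.filter_filter]
  congr 1
  apply List.filter_congr
  intro b hb
  rw [PySem.List.mem_pyRange_one] at hb
  rw [cellB_setCell hok hx0 hxn hj0 hjm ha.1 ha.2 hb.1 hb.2 true]
  by_cases hab : a = x ∧ b = j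
  · obtain ⟨rfl, rfl⟩ := hab
    simp
  · rw [if_neg hab]
    have hne : ¬ ((a, b) = (x, j)) := by
      simp only [Prod.mk.injEq]
      tauto
    simp [hne]


lemma findCur_eq (n m : Int) (vis : List (List Bool)) :
    findCur n m vis = ((pvFree n m vis).head?).getD (-1, -1) := by
  have hinner : ∀ a : Int,
      ((((PySem.List.pyRange 0 m 1).filter (fun b => !pvCellB vis a b)).map (fun b => (a, b))).head?)
        = (PySem.List.pyRange 0 m 1).findSome? (fun b => if pvCellB vis a b = false then some (a, b) else none) := by
    intro a
    rw [head?_filter_map (fun b => !pvCellB vis a b) (fun b => ((a : Int), b))]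
    congr 1
    funext b
    cases h : pvCellB vis a b <;> simp
  rw [findCur, pvFree, head?_flatMap]
  simp only [hinner]


lemma pvFree_length_le (n m : Int) (vis : List (List Bool)) :
    (pvFree n m vis).length ≤ n.toNat * m.toNat := by
  rw [pvFree, List.length_flatMap]
  have hb : ∀ c ∈ (PySem.List.pyRange 0 n 1).map
      (fun a => (((PySem.List.pyRange 0 m 1).filter (fun b => !pvCellB vis a b)).map (fun b => (a, b))).length),
      c ≤ m.toNat := by
    intro c hc
    rw [List.mem_map] at hc
    obtain ⟨a, _, rfl⟩ := hc
    rw [List.length_map]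
    calc ((PySem.List.pyRange 0 m 1).filter (fun b => !pvCellB vis a b)).length
        ≤ (PySem.List.pyRange 0 m 1).length := List.length_filter_le _ _
      _ = m.toNat := by rw [PySem.List.length_pyRange_one]; simp
  calc ((PySem.List.pyRange 0 n 1).map _).sum
      ≤ ((PySem.List.pyRange 0 n 1).map
          (fun a => (((PySem.List.pyRange 0 m 1).filter (fun b => !pvCellB vis a b)).map (fun b => (a, b))).length)).length * m.toNat := by
        exact List.sum_le_card_nsmul _ _ hb
    _ = n.toNat * m.toNat := by
        rw [List.length_map, PySem.List.length_pyRange_one]; simp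


-- ---- the column / row marking used by the loop invariants ----
def markCol (vis : List (List Bool)) (i x j : Int) : List (List Bool) :=
  (PySem.List.pyRange i x 1).foldl (fun v a => pvSetCell v a j true) vis

def markRow (vis : List (List Bool)) (i j y : Int) : List (List Bool) :=
  (PySem.List.pyRange j y 1).foldl (fun v b => pvSetCell v i b true) vis

lemma markCol_base (vis : List (List Bool)) (i j : Int) : markCol vis i i j = vis := by
  simp [markCol, PySem.List.pyRange_one_eq_nil (le_refl i)]


lemma markCol_succ (vis : List (List Bool)) (i x j : Int) (h : i ≤ x) :
    markCol vis i (x + 1) j = pvSetCell (markCol vis i x j) x j true := by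
  rw [markCol, PySem.List.pyRange_one_succ_right h, List.foldl_append]
  simp [markCol]


lemma markRow_base (vis : List (List Bool)) (i j : Int) : markRow vis i j j = vis := by
  simp [markRow, PySem.List.pyRange_one_eq_nil (le_refl j)]


lemma markRow_succ (vis : List (List Bool)) (i j y : Int) (h : j ≤ y) :
    markRow vis i j (y + 1) = pvSetCell (markRow vis i j y) i y true := by
  rw [markRow, PySem.List.pyRange_one_succ_right h, List.foldl_append]
  simp [markRow]


lemma gridOK_markCol {n m : Int} {vis : List (List Bool)} (hok : gridOK n m vis)
    {i x j : Int} (hi0 : 0 ≤ i) (hxn : x ≤ n) (hj0 : 0 ≤ j) (hjm : j < m) :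
    gridOK n m (markCol vis i x j) := by
  by_cases hxi : x ≤ i
  · rw [markCol, PySem.List.pyRange_one_eq_nil hxi, List.foldl_nil]
    exact hok
  · generalize hk : (x - i).toNat = k
    induction k generalizing x with
    | zero => omega
    | succ k ih =>
      obtain ⟨x', rfl⟩ : ∃ x', x = x' + 1 := ⟨x - 1, by omega⟩
      rw [markCol_succ _ _ _ _ (by omega)]
      by_cases hxi' : x' ≤ i
      · have : x' = i := by omega
        subst this
        rw [markCol_base]
        exact gridOK_setCell hok (by omega) (by omega) hj0 hjm true
      · exact gridOK_setCell (ih (by omega) (by omega) (by omega)) (by omega) (by omega) hj0 hjm true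

lemma cellB_markCol_out {n m : Int} {vis : List (List Bool)} (hok : gridOK n m vis)
    {i x j : Int} (hi0 : 0 ≤ i) (hxn : x ≤ n) (hj0 : 0 ≤ j) (hjm : j < m)
    {a b : Int} (ha0 : 0 ≤ a) (han : a < n) (hb0 : 0 ≤ b) (hbm : b < m)
    (hout : a < i ∨ x ≤ a ∨ b ≠ j) :
    pvCellB (markCol vis i x j) a b = pvCellB vis a b := by
  suffices H : ∀ (k : Nat) (x0 : Int), x0 ≤ n → (a < i ∨ x0 ≤ a ∨ b ≠ j) → (x0 - i).toNat = k →
      pvCellB (markCol vis i x0 j) a b = pvCellB vis a b by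
    exact H (x - i).toNat x hxn hout rfl
  intro k
  induction k with
  | zero =>
    intro x0 hxn2 hout2 hk
    have hxi : x0 ≤ i := by omega
    rw [markCol, PySem.List.pyRange_one_eq_nil hxi, List.foldl_nil]
  | succ k ih =>
    intro x0 hxn2 hout2 hk
    obtain ⟨x', rfl⟩ : ∃ x', x0 = x' + 1 := ⟨x0 - 1, by omega⟩
    rw [markCol_succ _ _ _ _ (by omega)]
    rw [cellB_setCell (gridOK_markCol hok hi0 (by omega) hj0 hjm) (by omega) (by omega) hj0 hjm
      ha0 han hb0 hbm true]
    have hne : ¬ (a = x' ∧ b = j) := by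
      rcases hout2 with h | h | h
      · omega
      · omega
      · intro hc
        exact h hc.2
    rw [if_neg hne]
    refine ih x' (by omega) ?_ (by omega)
    rcases hout2 with h | h | h
    · exact Or.inl h
    · exact Or.inr (Or.inl (by omega))
    · exact Or.inr (Or.inr h)

lemma resetCol_comm {n m : Int} {vis : List (List Bool)} (hok : gridOK n m vis)
    {i k j x' : Int} (hi0 : 0 ≤ i) (hkn : k ≤ n) (hj0 : 0 ≤ j) (hjm : j < m)
    (hx0 : 0 ≤ x') (hxn : x' < n) (hxout : x' < i ∨ k ≤ x') (v : Bool) :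
    (PySem.List.pyRange i k 1).foldl (fun w a => pvSetCell w a j false) (pvSetCell vis x' j v)
      = pvSetCell ((PySem.List.pyRange i k 1).foldl (fun w a => pvSetCell w a j false) vis) x' j v := by
  suffices H : ∀ (kk : Nat) (i0 : Int) (vis0 : List (List Bool)), gridOK n m vis0 → 0 ≤ i0 →
      (x' < i0 ∨ k ≤ x') → (k - i0).toNat = kk →
      (PySem.List.pyRange i0 k 1).foldl (fun w a => pvSetCell w a j false) (pvSetCell vis0 x' j v)
        = pvSetCell ((PySem.List.pyRange i0 k 1).foldl (fun w a => pvSetCell w a j false) vis0) x' j v by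
    exact H _ i vis hok hi0 hxout rfl
  intro kk
  induction kk with
  | zero =>
    intro i0 vis0 hok0 hi00 hout0 hk0
    have hki : k ≤ i0 := by omega
    rw [PySem.List.pyRange_one_eq_nil hki, List.foldl_nil, List.foldl_nil]
  | succ kk ih =>
    intro i0 vis0 hok0 hi00 hout0 hk0
    rw [PySem.List.pyRange_one_cons (by omega), List.foldl_cons, List.foldl_cons]
    rw [setCell_comm_row hok0 hx0 hxn hj0 hjm hi00 (by omega) hj0 hjm (by omega) v false]
    exact ih (i0 + 1) (pvSetCell vis0 i0 j false)
      (gridOK_setCell hok0 hi00 (by omega) hj0 hjm false) (by omega) (by omega) (by omega)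

lemma resetCol_restore {n m : Int} {vis : List (List Bool)} (hok : gridOK n m vis)
    {i x j : Int} (hi0 : 0 ≤ i) (hix : i ≤ x) (hxn : x ≤ n) (hj0 : 0 ≤ j) (hjm : j < m)
    (hfree : ∀ a : Int, i ≤ a → a < x → pvCellB vis a j = false) :
    pvResetCol (markCol vis i x j) i x j = vis := by
  suffices H : ∀ (kx : Nat) (x0 : Int), i ≤ x0 → x0 ≤ n →
      (∀ a : Int, i ≤ a → a < x0 → pvCellB vis a j = false) → (x0 - i).toNat = kx →
      pvResetCol (markCol vis i x0 j) i x0 j = vis by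
    exact H _ x hix hxn hfree rfl
  intro kx
  induction kx with
  | zero =>
    intro x0 h1 h2 h3 hk
    have hx0i : x0 = i := by omega
    rw [hx0i, markCol_base, pvResetCol, PySem.List.pyRange_one_eq_nil (le_refl i), List.foldl_nil]
  | succ kx ih =>
    intro x0 h1 h2 h3 hk
    obtain ⟨x', rfl⟩ : ∃ x', x0 = x' + 1 := ⟨x0 - 1, by omega⟩
    rw [markCol_succ _ _ _ _ (by omega), pvResetCol,
      PySem.List.pyRange_one_succ_right (by omega), List.foldl_append, List.foldl_cons,
      List.foldl_nil]
    have hokM := gridOK_markCol hok hi0 (show (x' : Int) ≤ n by omega) hj0 hjm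
    rw [resetCol_comm hokM hi0 (by omega : (x' : Int) ≤ n) hj0 hjm (by omega) (by omega)
      (Or.inr (le_refl x')) true]
    have hres := ih x' (by omega) (by omega) (fun a ha1 ha2 => h3 a ha1 (by omega)) (by omega)
    rw [pvResetCol] at hres
    rw [hres, setCell_setCell hok (by omega) (by omega) hj0 hjm true false]
    exact setCell_self hok (by omega) (by omega) hj0 hjm (h3 x' (by omega) (by omega))

lemma gridOK_markRow {n m : Int} {vis : List (List Bool)} (hok : gridOK n m vis)
    {i j y : Int} (hi0 : 0 ≤ i) (hin : i < n) (hj0 : 0 ≤ j) (hym : y ≤ m) :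
    gridOK n m (markRow vis i j y) := by
  by_cases hyj : y ≤ j
  · rw [markRow, PySem.List.pyRange_one_eq_nil hyj, List.foldl_nil]
    exact hok
  · generalize hk : (y - j).toNat = k
    induction k generalizing y with
    | zero => omega
    | succ k ih =>
      obtain ⟨y', rfl⟩ : ∃ y', y = y' + 1 := ⟨y - 1, by omega⟩
      rw [markRow_succ _ _ _ _ (by omega)]
      by_cases hyj' : y' ≤ j
      · have : y' = j := by omega
        rw [this, markRow_base]
        exact gridOK_setCell hok hi0 hin (by omega) (by omega) true
      · exact gridOK_setCell (ih (by omega) (by omega) (by omega)) hi0 hin (by omega)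
          (by omega) true

lemma cellB_markRow_out {n m : Int} {vis : List (List Bool)} (hok : gridOK n m vis)
    {i j y : Int} (hi0 : 0 ≤ i) (hin : i < n) (hj0 : 0 ≤ j) (hym : y ≤ m)
    {a b : Int} (ha0 : 0 ≤ a) (han : a < n) (hb0 : 0 ≤ b) (hbm : b < m)
    (hout : a ≠ i ∨ b < j ∨ y ≤ b) :
    pvCellB (markRow vis i j y) a b = pvCellB vis a b := by
  suffices H : ∀ (k : Nat) (y0 : Int), y0 ≤ m → (a ≠ i ∨ b < j ∨ y0 ≤ b) → (y0 - j).toNat = k →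
      pvCellB (markRow vis i j y0) a b = pvCellB vis a b by
    exact H (y - j).toNat y hym hout rfl
  intro k
  induction k with
  | zero =>
    intro y0 hym2 hout2 hk
    have hyj : y0 ≤ j := by omega
    rw [markRow, PySem.List.pyRange_one_eq_nil hyj, List.foldl_nil]
  | succ k ih =>
    intro y0 hym2 hout2 hk
    obtain ⟨y', rfl⟩ : ∃ y', y0 = y' + 1 := ⟨y0 - 1, by omega⟩
    rw [markRow_succ _ _ _ _ (by omega)]
    rw [cellB_setCell (gridOK_markRow hok hi0 hin hj0 (by omega)) hi0 hin (by omega) (by omega)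
      ha0 han hb0 hbm true]
    have hne : ¬ (a = i ∧ b = y') := by
      rcases hout2 with h | h | h
      · intro hc; exact h hc.1
      · omega
      · omega
    rw [if_neg hne]
    refine ih y' (by omega) ?_ (by omega)
    rcases hout2 with h | h | h
    · exact Or.inl h
    · exact Or.inr (Or.inl h)
    · exact Or.inr (Or.inr (by omega))

lemma resetRow_comm {n m : Int} {vis : List (List Bool)} (hok : gridOK n m vis)
    {i j k y' : Int} (hi0 : 0 ≤ i) (hin : i < n) (hj0 : 0 ≤ j) (hkm : k ≤ m)
    (hy0 : 0 ≤ y') (hym : y' < m) (hyout : y' < j ∨ k ≤ y') (v : Bool) :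
    (PySem.List.pyRange j k 1).foldl (fun w b => pvSetCell w i b false) (pvSetCell vis i y' v)
      = pvSetCell ((PySem.List.pyRange j k 1).foldl (fun w b => pvSetCell w i b false) vis) i y' v := by
  suffices H : ∀ (kk : Nat) (j0 : Int) (vis0 : List (List Bool)), gridOK n m vis0 → 0 ≤ j0 →
      (y' < j0 ∨ k ≤ y') → (k - j0).toNat = kk →
      (PySem.List.pyRange j0 k 1).foldl (fun w b => pvSetCell w i b false) (pvSetCell vis0 i y' v)
        = pvSetCell ((PySem.List.pyRange j0 k 1).foldl (fun w b => pvSetCell w i b false) vis0) i y' v by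
    exact H _ j vis hok hj0 hyout rfl
  intro kk
  induction kk with
  | zero =>
    intro j0 vis0 hok0 hj00 hout0 hk0
    have hkj : k ≤ j0 := by omega
    rw [PySem.List.pyRange_one_eq_nil hkj, List.foldl_nil, List.foldl_nil]
  | succ kk ih =>
    intro j0 vis0 hok0 hj00 hout0 hk0
    rw [PySem.List.pyRange_one_cons (by omega), List.foldl_cons, List.foldl_cons]
    rw [setCell_comm_col hok0 hi0 hin hy0 hym hj00 (by omega) (by omega) v false]
    exact ih (j0 + 1) (pvSetCell vis0 i j0 false)
      (gridOK_setCell hok0 hi0 hin hj00 (by omega) false) (by omega) (by omega) (by omega)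

lemma resetRow_restore {n m : Int} {vis : List (List Bool)} (hok : gridOK n m vis)
    {i j y : Int} (hi0 : 0 ≤ i) (hin : i < n) (hj0 : 0 ≤ j) (hjy : j ≤ y) (hym : y ≤ m)
    (hfree : ∀ b : Int, j ≤ b → b < y → pvCellB vis i b = false) :
    pvResetRow (markRow vis i j y) i j y = vis := by
  suffices H : ∀ (ky : Nat) (y0 : Int), j ≤ y0 → y0 ≤ m →
      (∀ b : Int, j ≤ b → b < y0 → pvCellB vis i b = false) → (y0 - j).toNat = ky →
      pvResetRow (markRow vis i j y0) i j y0 = vis by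
    exact H _ y hjy hym hfree rfl
  intro ky
  induction ky with
  | zero =>
    intro y0 h1 h2 h3 hk
    have hy0j : y0 = j := by omega
    rw [hy0j, markRow_base, pvResetRow, PySem.List.pyRange_one_eq_nil (le_refl j), List.foldl_nil]
  | succ ky ih =>
    intro y0 h1 h2 h3 hk
    obtain ⟨y', rfl⟩ : ∃ y', y0 = y' + 1 := ⟨y0 - 1, by omega⟩
    rw [markRow_succ _ _ _ _ (by omega), pvResetRow,
      PySem.List.pyRange_one_succ_right (by omega), List.foldl_append, List.foldl_cons,
      List.foldl_nil]
    have hokM := gridOK_markRow hok hi0 hin hj0 (show (y' : Int) ≤ m by omega)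
    rw [resetRow_comm hokM hi0 hin hj0 (by omega : (y' : Int) ≤ m) (by omega) (by omega)
      (Or.inr (le_refl y')) true]
    have hres := ih y' (by omega) (by omega) (fun b hb1 hb2 => h3 b hb1 (by omega)) (by omega)
    rw [pvResetRow] at hres
    rw [hres, setCell_setCell hok hi0 hin (by omega) (by omega) true false]
    exact setCell_self hok hi0 hin (by omega) (by omega) (h3 y' (by omega) (by omega))


-- ---- A's two loops against the pure walk ----
lemma vloop_eq (n m : Int) (arr : List (List Int)) (fuel : Nat)
    (hrec : ∀ vis result, gridOK n m vis → (pvFree n m vis).length < fuel →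
      dfsAux n m arr fuel vis result = (result + Btrue arr (pvFree n m vis), vis))
    (vis0 : List (List Bool)) (hok : gridOK n m vis0)
    (i j result : Int) (hi0 : 0 ≤ i) (hin : i < n) (hj0 : 0 ≤ j) (hjm : j < m) :
    ∀ (k : Nat) (x num val : Int) (f2 : Nat), k = (n - x).toNat → i ≤ x → x ≤ n →
      (∀ a : Int, i ≤ a → a < x → pvCellB vis0 a j = false) →
      (pvFree n m (markCol vis0 i x j)).length < f2 →
      (pvFree n m (markCol vis0 i x j)).length ≤ fuel →
      pvVloop n arr (fun v r => dfsAux n m arr fuel v r) i j result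
          (PySem.List.pyRange x (n + 1) 1) num (markCol vis0 i x j) (result + val)
        = (result + walkPure arr (Btrue arr) f2 num (pvFree n m (markCol vis0 i x j)) x j 1 0 val,
            vis0) := by
  intro k
  induction k with
  | zero =>
    intro x num val f2 hk hix hxn hfree hf2 hfuel
    have hxn' : x = n := by omega
    have hwalk : walkPure arr (Btrue arr) f2 num (pvFree n m (markCol vis0 i x j)) x j 1 0 val
        = val := by
      cases f2 with
      | zero => rfl
      | succ f2' =>
        have hnm : ((x : Int), j) ∉ pvFree n m (markCol vis0 i x j) := by
          intro hmm
          rcases mem_pvFree.mp hmm with ⟨_, h2, _⟩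
          omega
        simp [walkPure, hnm]
    rw [hwalk]
    rw [PySem.List.pyRange_one_cons (by omega : x < n + 1)]
    simp only [pvVloop]
    rw [if_pos (Or.inl hxn'), min_eq_left (le_of_eq hxn')]
    rw [resetCol_restore hok hi0 hix (by omega) hj0 hjm hfree]
  | succ k ih =>
    intro x num val f2 hk hix hxn hfree hf2 hfuel
    have hxlt : x < n := by omega
    have hokc : gridOK n m (markCol vis0 i x j) := gridOK_markCol hok hi0 (by omega) hj0 hjm
    rw [PySem.List.pyRange_one_cons (by omega : x < n + 1)]
    simp only [pvVloop]
    by_cases hcell : pvCellB (markCol vis0 i x j) x j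
    · -- the strip is blocked at x: A breaks and resets, B's walk stops
      rw [if_pos (Or.inr hcell)]
      have hnm : ((x : Int), j) ∉ pvFree n m (markCol vis0 i x j) := by
        intro hmm
        rcases mem_pvFree.mp hmm with ⟨_, _, _, _, h5⟩
        rw [hcell] at h5
        cases h5
      have hwalk : walkPure arr (Btrue arr) f2 num (pvFree n m (markCol vis0 i x j)) x j 1 0 val
          = val := by
        cases f2 with
        | zero => rfl
        | succ f2' => simp [walkPure, hnm]
      rw [hwalk, min_eq_left (le_of_lt hxlt)]
      rw [resetCol_restore hok hi0 hix (by omega) hj0 hjm hfree]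
    · -- the cell is free: A marks and recurses, B's walk takes a step
      rw [if_neg (fun hor => by
        rcases hor with h | h
        · omega
        · exact hcell h)]
      have hmem : ((x : Int), j) ∈ pvFree n m (markCol vis0 i x j) :=
        mem_pvFree.mpr ⟨by omega, hxlt, hj0, hjm, by simpa using hcell⟩
      have hfil := pvFree_setCell hokc (by omega : (0:Int) ≤ x) hxlt hj0 hjm
      have hlt := filter_ne_lt_length hmem
      have hmark : pvSetCell (markCol vis0 i x j) x j true = markCol vis0 i (x + 1) j :=
        (markCol_succ _ _ _ _ hix).symm
      have hrec' := hrec (pvSetCell (markCol vis0 i x j) x j true)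
        (result + (10 * num + pvCellA arr x j))
        (gridOK_setCell hokc (by omega) hxlt hj0 hjm true)
        (by rw [hfil]; omega)
      obtain ⟨f2', rfl⟩ : ∃ f2', f2 = f2' + 1 := ⟨f2 - 1, by omega⟩
      have hcont : (pvFree n m (markCol vis0 i x j)).contains ((x : Int), j) = true := by
        simpa using hmem
      have hfree' : ∀ a : Int, i ≤ a → a < x + 1 → pvCellB vis0 a j = false := by
        intro a ha1 ha2
        by_cases hax : a < x
        · exact hfree a ha1 hax
        · have hax' : a = x := by omega
          subst hax'
          rw [← cellB_markCol_out hok hi0 (le_of_lt hxlt) hj0 hjm (by omega) hxlt hj0 hjm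
            (Or.inr (Or.inl (le_refl a)))]
          simpa using hcell
      simp only [walkPure, hcont, if_true]
      rw [hrec']
      dsimp only
      rw [hmark]
      have hfil2 : pvFree n m (markCol vis0 i (x + 1) j)
          = (pvFree n m (markCol vis0 i x j)).filter (fun c => c ≠ (x, j)) := by
        rw [← hmark]
        exact hfil
      rw [hfil2]
      have hmax : max (result + val)
          (result + (10 * num + pvCellA arr x j) + Btrue arr
            ((pvFree n m (markCol vis0 i x j)).filter (fun c => c ≠ (x, j)))) =
          result + max val ((10 * num + pvCellA arr x j) + Btrue arr
            ((pvFree n m (markCol vis0 i x j)).filter (fun c => c ≠ (x, j)))) := by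
        have h1 := le_max_left val ((10 * num + pvCellA arr x j) + Btrue arr
          ((pvFree n m (markCol vis0 i x j)).filter (fun c => c ≠ (x, j))))
        omega
      rw [hmax]
      have hih := ih (x + 1) (10 * num + pvCellA arr x j)
        (max val ((10 * num + pvCellA arr x j) + Btrue arr
          ((pvFree n m (markCol vis0 i x j)).filter (fun c => c ≠ (x, j))))) f2'
        (by omega) (by omega) (by omega) hfree'
        (by rw [hfil2]; omega) (by rw [hfil2]; omega)
      rw [hfil2] at hih
      simp only [add_zero]
      rw [hih]


lemma hloop_eq (n m : Int) (arr : List (List Int)) (fuel : Nat)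
    (hrec : ∀ vis result, gridOK n m vis → (pvFree n m vis).length < fuel →
      dfsAux n m arr fuel vis result = (result + Btrue arr (pvFree n m vis), vis))
    (vis0 : List (List Bool)) (hok : gridOK n m vis0)
    (i j result : Int) (hi0 : 0 ≤ i) (hin : i < n) (hj0 : 0 ≤ j) (hjm : j < m) :
    ∀ (k : Nat) (y num val : Int) (f2 : Nat), k = (m - y).toNat → j ≤ y → y ≤ m →
      (∀ b : Int, j ≤ b → b < y → pvCellB vis0 i b = false) →
      (pvFree n m (markRow vis0 i j y)).length < f2 →
      (pvFree n m (markRow vis0 i j y)).length ≤ fuel →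
      pvHloop m arr (fun v r => dfsAux n m arr fuel v r) i j result
          (PySem.List.pyRange y (m + 1) 1) num (markRow vis0 i j y) (result + val)
        = (result + walkPure arr (Btrue arr) f2 num (pvFree n m (markRow vis0 i j y)) i y 0 1 val,
            vis0) := by
  intro k
  induction k with
  | zero =>
    intro y num val f2 hk hjy hym hfree hf2 hfuel
    have hym' : y = m := by omega
    have hwalk : walkPure arr (Btrue arr) f2 num (pvFree n m (markRow vis0 i j y)) i y 0 1 val
        = val := by
      cases f2 with
      | zero => rfl
      | succ f2' =>
        have hnm : ((i : Int), y) ∉ pvFree n m (markRow vis0 i j y) := by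
          intro hmm
          rcases mem_pvFree.mp hmm with ⟨_, _, _, h4, _⟩
          omega
        simp [walkPure, hnm]
    rw [hwalk]
    rw [PySem.List.pyRange_one_cons (by omega : y < m + 1)]
    simp only [pvHloop]
    rw [if_pos (Or.inl hym'), min_eq_left (le_of_eq hym')]
    rw [resetRow_restore hok hi0 hin hj0 hjy (by omega) hfree]
  | succ k ih =>
    intro y num val f2 hk hjy hym hfree hf2 hfuel
    have hylt : y < m := by omega
    have hokc : gridOK n m (markRow vis0 i j y) := gridOK_markRow hok hi0 hin hj0 (by omega)
    rw [PySem.List.pyRange_one_cons (by omega : y < m + 1)]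
    simp only [pvHloop]
    by_cases hcell : pvCellB (markRow vis0 i j y) i y
    · rw [if_pos (Or.inr hcell)]
      have hnm : ((i : Int), y) ∉ pvFree n m (markRow vis0 i j y) := by
        intro hmm
        rcases mem_pvFree.mp hmm with ⟨_, _, _, _, h5⟩
        rw [hcell] at h5
        cases h5
      have hwalk : walkPure arr (Btrue arr) f2 num (pvFree n m (markRow vis0 i j y)) i y 0 1 val
          = val := by
        cases f2 with
        | zero => rfl
        | succ f2' => simp [walkPure, hnm]
      rw [hwalk, min_eq_left (le_of_lt hylt)]
      rw [resetRow_restore hok hi0 hin hj0 hjy (by omega) hfree]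
    · rw [if_neg (fun hor => by
        rcases hor with h | h
        · omega
        · exact hcell h)]
      have hmem : ((i : Int), y) ∈ pvFree n m (markRow vis0 i j y) :=
        mem_pvFree.mpr ⟨hi0, hin, by omega, hylt, by simpa using hcell⟩
      have hfil := pvFree_setCell hokc hi0 hin (by omega : (0:Int) ≤ y) hylt
      have hlt := filter_ne_lt_length hmem
      have hmark : pvSetCell (markRow vis0 i j y) i y true = markRow vis0 i j (y + 1) :=
        (markRow_succ _ _ _ _ hjy).symm
      have hrec' := hrec (pvSetCell (markRow vis0 i j y) i y true)
        (result + (num * 10 + pvCellA arr i y))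
        (gridOK_setCell hokc hi0 hin (by omega) hylt true)
        (by rw [hfil]; omega)
      obtain ⟨f2', rfl⟩ : ∃ f2', f2 = f2' + 1 := ⟨f2 - 1, by omega⟩
      have hcont : (pvFree n m (markRow vis0 i j y)).contains ((i : Int), y) = true := by
        simpa using hmem
      have hfree' : ∀ b : Int, j ≤ b → b < y + 1 → pvCellB vis0 i b = false := by
        intro b hb1 hb2
        by_cases hby : b < y
        · exact hfree b hb1 hby
        · have hby' : b = y := by omega
          subst hby'
          rw [← cellB_markRow_out hok hi0 hin hj0 (le_of_lt hylt) hi0 hin (by omega) hylt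
            (Or.inr (Or.inr (le_refl b)))]
          simpa using hcell
      simp only [walkPure, hcont, if_true]
      have hsum : num * 10 + pvCellA arr i y = 10 * num + pvCellA arr i y := by ring
      rw [hsum] at hrec' ⊢
      rw [hrec']
      dsimp only
      rw [hmark]
      have hfil2 : pvFree n m (markRow vis0 i j (y + 1))
          = (pvFree n m (markRow vis0 i j y)).filter (fun c => c ≠ (i, y)) := by
        rw [← hmark]
        exact hfil
      rw [hfil2]
      have hmax : max (result + val)
          (result + (10 * num + pvCellA arr i y) + Btrue arr
            ((pvFree n m (markRow vis0 i j y)).filter (fun c => c ≠ (i, y)))) =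
          result + max val ((10 * num + pvCellA arr i y) + Btrue arr
            ((pvFree n m (markRow vis0 i j y)).filter (fun c => c ≠ (i, y)))) := by
        have h1 := le_max_left val ((10 * num + pvCellA arr i y) + Btrue arr
          ((pvFree n m (markRow vis0 i j y)).filter (fun c => c ≠ (i, y))))
        omega
      rw [hmax]
      have hih := ih (y + 1) (10 * num + pvCellA arr i y)
        (max val ((10 * num + pvCellA arr i y) + Btrue arr
          ((pvFree n m (markRow vis0 i j y)).filter (fun c => c ≠ (i, y))))) f2'
        (by omega) (by omega) (by omega) hfree'
        (by rw [hfil2]; omega) (by rw [hfil2]; omega)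
      rw [hfil2] at hih
      simp only [add_zero]
      rw [hih]


-- ---- the main induction over A ----
lemma dfsAux_correct (n m : Int) (arr : List (List Int)) :
    ∀ (fuel : Nat) (vis : List (List Bool)) (result : Int), gridOK n m vis →
      (pvFree n m vis).length < fuel →
      dfsAux n m arr fuel vis result = (result + Btrue arr (pvFree n m vis), vis) := by
  intro fuel
  induction fuel with
  | zero =>
    intro vis result hok hlen
    omega
  | succ fuel ih =>
    intro vis result hok hlen
    simp only [dfsAux]
    rw [findCur_eq]
    rcases hfc : pvFree n m vis with _ | ⟨⟨i, j⟩, rest⟩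
    · simp [Btrue_nil]
    · have hmem : ((i, j)) ∈ pvFree n m vis := by
        rw [hfc]
        simp
      rcases mem_pvFree.mp hmem with ⟨hi0, hin, hj0, hjm, hcell⟩
      have hne : ¬ (((((i, j) :: rest).head?).getD (-1, -1)).1 = -1 ∧
          ((((i, j) :: rest).head?).getD (-1, -1)).2 = -1) := by
        simp
        omega
      rw [if_neg hne]
      simp only [List.head?_cons, Option.getD_some]
      have hfuel' : (pvFree n m vis).length ≤ fuel := by omega
      have hv := vloop_eq n m arr fuel ih vis hok i j result hi0 hin hj0 hjm
        ((n - i).toNat) i 0 0 ((pvFree n m vis).length + 1) rfl (le_refl i) (by omega)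
        (by intro a h1 h2; exact absurd h2 (by omega))
        (by rw [markCol_base]; omega) (by rw [markCol_base]; omega)
      rw [markCol_base] at hv
      rw [add_zero] at hv
      have hh := hloop_eq n m arr fuel ih vis hok i j result hi0 hin hj0 hjm
        ((m - j).toNat) j 0
        (walkPure arr (Btrue arr) ((pvFree n m vis).length + 1) 0 (pvFree n m vis) i j 1 0 0)
        ((pvFree n m vis).length + 1) rfl (le_refl j) (by omega)
        (by intro b h1 h2; exact absurd h2 (by omega))
        (by rw [markRow_base]; omega) (by rw [markRow_base]; omega)
      rw [markRow_base] at hh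
      rw [hfc] at hv hh
      rw [hv, hh, Btrue_unfold]


-- ===== VERDICT (by name: the statement is the Claim_ definition above) =====
theorem dfs_spec : Claim_equal_dfs := by
  intro n m arr visited result _hdom hpre
  unfold Spec_dfs
  have hv := pre_gridOK_vis hpre
  have hfuel : (pvFree n m visited).length < n.toNat * m.toNat + 1 :=
    Nat.lt_succ_of_le (pvFree_length_le n m visited)
  rw [dfs, dfsAux_correct n m arr _ visited result hv hfuel, dfs_alt_eq]
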